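-- pv_equiv track=rewrite | github.com/Sadomtsevvs/Leetcode | Meta. Element Swapping.py | findMinArray
-- ===== SOURCE A (Python) =====
-- def findMinArray(arr, k):
--     moves_remain = k
--     start = 0
--     while moves_remain > 0 and start < len(arr) - 1:
--         minel = arr[start]
--         minind = start
--         for i in range(1, moves_remain + 1):
--             if i + start > len(arr) - 1:
--                 break
--             if arr[i+start] < minel:
--                 minel = arr[i+start]
--                 minind = i + start
--         if minind != start:
--             for i in range(minind, start, - 1):
--                 arr[i], arr[i-1] = arr[i-1], arr[i]
--             moves_remain -= (minind - start)
--         start += 1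
--     return arr
-- ===== SOURCE B (Python) =====
-- def findMinArray(arr, k):
--     # Builds the answer front-to-back: repeatedly pop the first minimum of the
--     # reachable window instead of doing adjacent swaps in place.
--     # (A mutates arr in place; B leaves arr untouched — return value is the same.)
--     out = []
--     rem = list(arr)
--     budget = k
--     while budget > 0 and len(rem) > 1:
--         window = rem[:budget + 1]
--         j = window.index(min(window))
--         out.append(rem.pop(j))
--         budget -= j
--     return out + rem
-- ===== Notes on version B (the rewrite author's own statement) =====
-- stated objective: idiomatic
-- what changed: B builds the result front-to-back by repeatedly popping the first minimum of the reachable k-window (min/index/pop on a slice) instead of A's in-place nested adjacent-swap loops over index arithmetic; A also mutates arr in place, B does not (return value identical).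
import Mathlib
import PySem

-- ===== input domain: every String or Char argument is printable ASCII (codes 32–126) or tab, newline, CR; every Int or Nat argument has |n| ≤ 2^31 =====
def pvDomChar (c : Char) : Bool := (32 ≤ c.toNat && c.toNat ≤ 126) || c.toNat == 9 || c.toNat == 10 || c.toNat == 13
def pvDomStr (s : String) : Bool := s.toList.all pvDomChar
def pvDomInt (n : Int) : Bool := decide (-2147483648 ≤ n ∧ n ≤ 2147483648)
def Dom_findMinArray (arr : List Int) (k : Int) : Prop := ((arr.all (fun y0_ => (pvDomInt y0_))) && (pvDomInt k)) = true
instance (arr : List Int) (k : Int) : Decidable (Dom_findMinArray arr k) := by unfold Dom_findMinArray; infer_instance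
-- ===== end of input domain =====

-- B builds the result front-to-back by popping the first window-minimum (min/index/pop on a
-- slice) instead of A's in-place adjacent-swap loops; A mutates arr in place, B does not —
-- the equivalence proved is about the return value.

-- ===== PORT A =====

-- the inner 'for i in range(1, moves_remain + 1)' scan of A, with its break; fuel is the
-- number of indices the range still holds (moves_remain + 1 - i), decremented structurally
def aScan (arr : List Int) (start : Int) : Nat → Int → Int → Int → Int × Int
  | 0, _, minel, minind => (minel, minind)  -- range exhausted
  | fuel + 1, i, minel, minind =>
    if i + start > (arr.length : Int) - 1 then (minel, minind)
    else
      match PySem.List.pyGet? arr (i + start) with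
      | none => (minel, minind)  -- unreachable: 0 ≤ i + start ≤ len - 1 here
      | some v =>
        if v < minel then aScan arr start fuel (i + 1) v (i + start)
        else aScan arr start fuel (i + 1) minel minind

-- the inner 'for i in range(minind, start, -1)' swap loop of A (loop over the range list)
def aSwaps (arr : List Int) (idxs : List Int) : List Int :=
  match idxs with
  | [] => arr
  | i :: is =>
    match PySem.List.pyGet? arr i, PySem.List.pyGet? arr (i - 1) with
    | some vi, some vim => aSwaps ((arr.set i.toNat vim).set (i - 1).toNat vi) is
    | _, _ => arr  -- unreachable: both indices are in range when A swaps

-- A's outer while loop; gas = arr.length is enough fuel, since start grows by 1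
-- per iteration and the loop stops once start reaches len(arr) - 1
def aLoop : Nat → List Int → Int → Int → List Int
  | 0, arr, _, _ => arr
  | gas + 1, arr, moves, start =>
    if moves > 0 ∧ start < (arr.length : Int) - 1 then
      let m0 := (PySem.List.pyGet? arr start).getD 0  -- arr[start]; in range on every reachable call
      let r := aScan arr start moves.toNat 1 m0 start  -- range(1, moves+1) has moves indices
      if r.2 ≠ start then
        aLoop gas (aSwaps arr (PySem.List.pyRange r.2 start (-1))) (moves - (r.2 - start)) (start + 1)
      else
        aLoop gas arr moves (start + 1)
    else arr

def findMinArray (arr : List Int) (k : Int) : List Int := aLoop arr.length arr k 0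

-- ===== PORT B =====

-- B's while loop: out is the accumulated prefix, rem the remaining elements
def bLoop (out rem : List Int) (budget : Int) : List Int :=
  if budget > 0 ∧ 1 < rem.length then
    let window := PySem.List.slice rem (some 0) (some (budget + 1))
    match PySem.List.min? window (fun x => x) with
    | none => out ++ rem  -- unreachable: window is nonempty
    | some m =>
      match PySem.List.index? window m with
      | none => out ++ rem  -- unreachable: m ∈ window
      | some j =>
        match _hp : PySem.List.pop? rem (j : Int) with
        | none => out ++ rem  -- unreachable: j < len rem
        | some (x, rem') => bLoop (out ++ [x]) rem' (budget - (j : Int))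
  else out ++ rem
termination_by rem.length
decreasing_by have := PySem.List.length_of_pop?_eq_some rem _hp; simp at this ⊢; omega

def findMinArray_alt (arr : List Int) (k : Int) : List Int := bLoop [] arr k

-- ===== PRECONDITION & SPEC =====
def Spec_findMinArray (arr : List Int) (k : Int) (out : List Int) : Prop := out = findMinArray_alt arr k
instance (arr : List Int) (k : Int) (out : List Int) : Decidable (Spec_findMinArray arr k out) := by unfold Spec_findMinArray; infer_instance

-- ===== CLAIM (what is proved, stated in full; the proofs are below) =====
def Claim_equal_findMinArray : Prop := ∀ (arr : List Int) (k : Int), Dom_findMinArray arr k → Spec_findMinArray arr k (findMinArray arr k)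

-- ===== LEMMAS AND PROOFS =====

-- abstract version of aScan: scans the listed elements, carrying (current min, its index)
def pureScan : List Int → Int → Int → Int → Int × Int
  | [], m, j, _ => (m, j)
  | v :: t, m, j, pos =>
      if v < m then pureScan t v pos (pos + 1) else pureScan t m j (pos + 1)

theorem aScan_eq_pureScan (arr : List Int) (start : Int) (hs : 0 ≤ start) :
    ∀ (fuel : Nat) (moves i m j : Int), 1 ≤ i → (moves + 1 - i).toNat = fuel →
    aScan arr start fuel i m j =
      pureScan ((arr.drop (start + i).toNat).take (moves + 1 - i).toNat) m j (start + i) := by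
  intro fuel
  induction fuel with
  | zero =>
      intro moves i m j hi hf
      rw [hf]
      simp [aScan, pureScan]
  | succ fuel ih =>
      intro moves i m j hi hf
      rw [aScan]
      by_cases hbreak : i + start > (arr.length : Int) - 1
      · rw [if_pos hbreak]
        have hdrop : arr.drop (start + i).toNat = [] := by
          apply List.drop_eq_nil_of_le; omega
        rw [hdrop]
        simp [pureScan]
      · rw [if_neg hbreak]
        have hp : (start + i).toNat < arr.length := by omega
        have hv : PySem.List.pyGet? arr (i + start) = some arr[(start + i).toNat] := by
          rw [PySem.List.pyGet?_of_nonneg _ (by omega : (0:Int) ≤ i + start)]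
          rw [show (i + start).toNat = (start + i).toNat by omega]
          exact List.getElem?_eq_getElem hp
        rw [hv]
        dsimp only
        rw [List.drop_eq_getElem_cons hp]
        have htk : (moves + 1 - i).toNat = (moves + 1 - (i + 1)).toNat + 1 := by omega
        rw [htk, List.take_succ_cons, pureScan]
        by_cases hcmp : arr[(start + i).toNat] < m
        · rw [if_pos hcmp, ih moves (i + 1) _ _ (by omega) (by omega)]
          rw [show (start + (i + 1)).toNat = (start + i).toNat + 1 by omega,
              show start + (i + 1) = start + i + 1 by ring,
              show i + start = start + i by ring]
          rw [if_pos hcmp]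
        · rw [if_neg hcmp, ih moves (i + 1) _ _ (by omega) (by omega)]
          rw [show (start + (i + 1)).toNat = (start + i).toNat + 1 by omega,
              show start + (i + 1) = start + i + 1 by ring]
          rw [if_neg hcmp]

theorem foldl_min_comm (t : List Int) : ∀ x y, t.foldl min (min x y) = min x (t.foldl min y) := by
  induction t with
  | nil => intro x y; rfl
  | cons a t ih =>
      intro x y
      simp only [List.foldl_cons, min_assoc]
      exact ih x (min y a)

theorem pureScan_spec (u : List Int) : ∀ (m j pos : Int),
    pureScan u m j pos =
      match PySem.List.min? u (fun x => x) with
      | none => (m, j)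
      | some mu =>
          if mu < m then (mu, pos + (((PySem.List.index? u mu).getD 0 : Nat) : Int)) else (m, j) := by
  induction u with
  | nil => intro m j pos; simp [pureScan, PySem.List.min?]
  | cons x t ih =>
      intro m j pos
      rw [PySem.List.min?_id_cons]
      cases t with
      | nil =>
          simp only [List.foldl_nil]
          by_cases hx : x < m
          · rw [pureScan, if_pos hx]
            simp [pureScan, hx]
          · rw [pureScan, if_neg hx]
            simp [pureScan, hx]
      | cons y t' =>
          have hmtmem : t'.foldl min y ∈ y :: t' := by
            rcases PySem.List.foldl_min_mem t' y with h | h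
            · rw [h]; exact List.mem_cons_self
            · exact List.mem_cons_of_mem _ h
          obtain ⟨jt, hjt⟩ : ∃ jt, PySem.List.index? (y :: t') (t'.foldl min y) = some jt := by
            have := (PySem.List.index?_isSome_iff (y :: t') (t'.foldl min y)).mpr hmtmem
            exact Option.isSome_iff_exists.mp this
          have hmu : List.foldl min x (y :: t') = min x (t'.foldl min y) := by
            simp only [List.foldl_cons]
            exact foldl_min_comm t' x y
          rw [hmu]
          set mt := t'.foldl min y with hmtdef
          by_cases hx : x < m
          · rw [pureScan, if_pos hx, ih x pos (pos + 1), PySem.List.min?_id_cons, ← hmtdef]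
            dsimp only
            have hcond : min x mt < m := lt_of_le_of_lt (min_le_left _ _) hx
            rw [if_pos hcond]
            by_cases hmtx : mt < x
            · have : min x mt = mt := min_eq_right (le_of_lt hmtx)
              rw [this, if_pos hmtx,
                  PySem.List.index?_cons_of_ne _ (ne_of_gt hmtx), hjt]
              simp; ring
            · have hxmt : x ≤ mt := not_lt.mp hmtx
              have : min x mt = x := min_eq_left hxmt
              rw [this, if_neg hmtx, PySem.List.index?_cons_self]
              simp
          · rw [pureScan, if_neg hx, ih m j (pos + 1), PySem.List.min?_id_cons, ← hmtdef]
            dsimp only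
            by_cases hmtm : mt < m
            · have hmtx : mt < x := lt_of_lt_of_le hmtm (not_lt.mp hx)
              have : min x mt = mt := min_eq_right (le_of_lt hmtx)
              rw [this, if_pos hmtm, if_pos hmtm,
                  PySem.List.index?_cons_of_ne _ (ne_of_gt hmtx), hjt]
              simp; ring
            · have : ¬ min x mt < m := by
                simp only [min_lt_iff, not_or]; exact ⟨hx, hmtm⟩
              rw [if_neg hmtm, if_neg this]

theorem scan_argmin (r0 : Int) (u : List Int) (p : Int) (M : Int) (J : Nat)
    (hmin : PySem.List.min? (r0 :: u) (fun x => x) = some M)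
    (hidx : PySem.List.index? (r0 :: u) M = some J) :
    pureScan u r0 p (p + 1) = (M, p + (J : Int)) := by
  rw [PySem.List.min?_id_cons] at hmin
  have hM : M = List.foldl min r0 u := by exact (Option.some.injEq _ _).mp hmin.symm
  cases u with
  | nil =>
      simp [pureScan]
      constructor
      · simpa using hM.symm
      · rw [hM] at hidx
        simp at hidx
        omega
  | cons y t' =>
      have hmu : List.foldl min r0 (y :: t') = min r0 (t'.foldl min y) := by
        simp only [List.foldl_cons]
        exact foldl_min_comm t' r0 y
      set mt := t'.foldl min y with hmtdef
      rw [pureScan_spec, PySem.List.min?_id_cons, ← hmtdef]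
      dsimp only
      rw [hmu] at hM
      by_cases hmtr : mt < r0
      · have hMeq : M = mt := by rw [hM]; exact min_eq_right (le_of_lt hmtr)
        rw [hMeq] at hidx
        rw [PySem.List.index?_cons_of_ne _ (ne_of_gt hmtr)] at hidx
        obtain ⟨jt, hjt, hJ⟩ := Option.map_eq_some_iff.mp hidx
        rw [if_pos hmtr, hjt, hMeq]
        simp [← hJ]
        ring
      · have hMeq : M = r0 := by rw [hM]; exact min_eq_left (not_lt.mp hmtr)
        rw [hMeq, PySem.List.index?_cons_self] at hidx
        rw [if_neg hmtr, hMeq]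
        simp at hidx
        simp [← hidx]

theorem set_append_len (p : List Int) : ∀ (q : List Int) (v : Int),
    (p ++ q).set p.length v = p ++ q.set 0 v := by
  induction p with
  | nil => intro q v; simp
  | cons a p ih => intro q v; simp [ih]

theorem swaps_rotate (seg : List Int) : ∀ (out suf : List Int) (M : Int),
    aSwaps (out ++ seg ++ M :: suf)
        (PySem.List.pyRange ((out.length : Int) + (seg.length : Int)) ((out.length : Int)) (-1))
      = out ++ M :: (seg ++ suf) := by
  induction seg using List.reverseRecOn with
  | nil =>
      intro out suf M
      rw [PySem.List.pyRange_neg_one_eq_nil (by simp)]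
      simp [aSwaps]
  | append_singleton s b ih =>
      intro out suf M
      rw [PySem.List.pyRange_neg_one_cons (by simp), aSwaps]
      have e1 : out ++ (s ++ [b]) ++ M :: suf = (out ++ s ++ [b]) ++ M :: suf := by simp
      have hi : (out.length : Int) + ((s ++ [b]).length : Int) = ((out ++ s ++ [b]).length : Int) := by
        push_cast [List.length_append, List.length_cons, List.length_nil]; omega
      have hget1 : PySem.List.pyGet? (out ++ (s ++ [b]) ++ M :: suf)
          ((out.length : Int) + ((s ++ [b]).length : Int)) = some M := by
        rw [e1, hi]; exact PySem.List.pyGet?_append_length _ _ _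
      have e2 : out ++ (s ++ [b]) ++ M :: suf = (out ++ s) ++ b :: M :: suf := by simp
      have hi2 : (out.length : Int) + ((s ++ [b]).length : Int) - 1 = ((out ++ s).length : Int) := by
        push_cast [List.length_append, List.length_cons, List.length_nil]; omega
      have hget2 : PySem.List.pyGet? (out ++ (s ++ [b]) ++ M :: suf)
          ((out.length : Int) + ((s ++ [b]).length : Int) - 1) = some b := by
        rw [e2, hi2]; exact PySem.List.pyGet?_append_length _ _ _
      rw [hget1, hget2]
      dsimp only
      have hn1 : ((out.length : Int) + ((s ++ [b]).length : Int)).toNat = (out ++ s ++ [b]).length := by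
        simp [List.length_append]; omega
      have hn2 : ((out.length : Int) + ((s ++ [b]).length : Int) - 1).toNat = (out ++ s).length := by
        simp [List.length_append]; omega
      have hset : ((out ++ (s ++ [b]) ++ M :: suf).set
            ((out.length : Int) + ((s ++ [b]).length : Int)).toNat b).set
            ((out.length : Int) + ((s ++ [b]).length : Int) - 1).toNat M
          = out ++ s ++ M :: b :: suf := by
        rw [hn1, hn2, e1, set_append_len]
        have : (out ++ s ++ [b]) ++ (M :: suf).set 0 b = (out ++ s) ++ b :: b :: suf := by simp
        rw [this, set_append_len]
        simp
      rw [hset]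
      have hi3 : (out.length : Int) + ((s ++ [b]).length : Int) - 1
          = (out.length : Int) + (s.length : Int) := by
        push_cast [List.length_append, List.length_cons, List.length_nil]; omega
      rw [hi3]
      have := ih out (b :: suf) M
      rw [show out ++ s ++ M :: b :: suf = out ++ s ++ M :: (b :: suf) by simp] at *
      rw [this]
      simp

theorem eraseIdx_append_len (p : List Int) : ∀ (s : List Int) (M : Int),
    (p ++ M :: s).eraseIdx p.length = p ++ s := by
  induction p with
  | nil => intro s M; simp
  | cons a p ih => intro s M; simp [ih]

theorem main_loop (gas : Nat) : ∀ (rem out : List Int) (moves : Int), rem.length ≤ gas →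
    aLoop gas (out ++ rem) moves (out.length : Int) = bLoop out rem moves := by
  induction gas with
  | zero =>
      intro rem out moves hle
      have hnil : rem = [] := by
        cases rem with | nil => rfl | cons a t => simp at hle
      subst hnil
      rw [bLoop]
      simp [aLoop]
  | succ gas ih =>
      intro rem out moves hle
      by_cases hg : moves > 0 ∧ 1 < rem.length
      · obtain ⟨hm, hlen⟩ := hg
        cases rem with
        | nil => simp at hlen
        | cons r0 rest =>
        simp only [List.length_cons] at hlen hle
        have hA : moves > 0 ∧ (out.length : Int) < ((out ++ r0 :: rest).length : Int) - 1 := by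
          refine ⟨hm, ?_⟩
          push_cast [List.length_append, List.length_cons]
          omega
        rw [aLoop, if_pos hA]
        have hm0 : (PySem.List.pyGet? (out ++ r0 :: rest) ((out.length : Int))).getD 0 = r0 := by
          rw [PySem.List.pyGet?_append_length]
          rfl
        set u := rest.take moves.toNat with hu
        have hNpos : (moves + 1).toNat = moves.toNat + 1 := by omega
        have hwin : PySem.List.slice (r0 :: rest) (some 0) (some (moves + 1))
            = r0 :: u := by
          rw [PySem.List.slice_toNat _ (by omega) (by omega)]
          simp [hNpos, hu]
        rcases hMinE : PySem.List.min? (r0 :: u) (fun x => x) with _ | M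
        · exfalso
          rw [PySem.List.min?_eq_none_iff] at hMinE
          simp at hMinE
        obtain ⟨J, hIdx⟩ : ∃ J, PySem.List.index? (r0 :: u) M = some J := by
          have hmem := PySem.List.min?_mem hMinE
          have := (PySem.List.index?_isSome_iff (r0 :: u) M).mpr hmem
          exact Option.isSome_iff_exists.mp this
        have hscan : aScan (out ++ r0 :: rest) ((out.length : Int))
              moves.toNat 1 r0 ((out.length : Int))
            = (M, (out.length : Int) + (J : Int)) := by
          rw [aScan_eq_pureScan _ _ (by omega) moves.toNat moves 1 _ _ (le_refl 1) (by omega)]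
          have hdropn : ((out.length : Int) + 1).toNat = (out ++ [r0]).length := by
            simp
          have hdrop : (out ++ r0 :: rest).drop ((out.length : Int) + 1).toNat = rest := by
            rw [hdropn, show out ++ r0 :: rest = (out ++ [r0]) ++ rest by simp, List.drop_left]
          rw [hdrop]
          have h1 : (moves + 1 - 1).toNat = moves.toNat := by omega
          rw [h1, ← hu]
          exact scan_argmin r0 u ((out.length : Int)) M J hMinE hIdx
        obtain ⟨pre, sufw, hwdec, hpreJ, _⟩ := (PySem.List.index?_eq_some_iff _ _ _).mp hIdx
        have hremdec : r0 :: rest = pre ++ M :: (sufw ++ (r0 :: rest).drop (moves + 1).toNat) := by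
          conv_lhs => rw [← List.take_append_drop (moves + 1).toNat (r0 :: rest)]
          have htake : (r0 :: rest).take (moves + 1).toNat = r0 :: u := by
            simp [hNpos, hu]
          rw [htake, hwdec]
          simp
        set s2 := sufw ++ (r0 :: rest).drop (moves + 1).toNat with hs2
        have hJlt : J < (r0 :: rest).length := by
          have := congrArg List.length hremdec
          simp [List.length_append] at this
          simp [List.length_cons]
          omega
        have hget : (r0 :: rest)[J]'hJlt = M := by
          have h2 := PySem.List.pyGet?_append_length pre s2 M
          rw [PySem.List.pyGet?_of_nonneg _ (by omega)] at h2
          rw [show ((pre.length : Int)).toNat = pre.length by omega] at h2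
          have h3 : (pre ++ M :: s2)[pre.length]? = some M := h2
          rw [← hremdec] at h3
          have h4 : (r0 :: rest)[J]? = some M := by rw [← hpreJ]; exact h3
          obtain ⟨hh, hval⟩ := List.getElem?_eq_some_iff.mp h4
          exact hval
        have hpop : PySem.List.pop? (r0 :: rest) ((J : Nat) : Int) = some (M, pre ++ s2) := by
          rw [PySem.List.pop?_natCast _ J hJlt, hget]
          congr 1
          rw [show (r0 :: rest).eraseIdx J = (pre ++ M :: s2).eraseIdx pre.length by rw [← hremdec, hpreJ]]
          rw [eraseIdx_append_len]
        have hB : bLoop out (r0 :: rest) moves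
            = bLoop (out ++ [M]) (pre ++ s2) (moves - (J : Int)) := by
          rw [bLoop, if_pos ⟨hm, by simp [List.length_cons]; omega⟩]
          dsimp only
          rw [hwin, hMinE]
          dsimp only
          rw [hIdx]
          dsimp only
          rw [hpop]
        rw [hB, hm0]
        dsimp only
        rw [hscan]
        dsimp only
        have hlen2 : pre.length + s2.length ≤ gas := by
          have := congrArg List.length hremdec
          simp [List.length_append, List.length_cons] at this
          omega
        by_cases hJ0 : J = 0
        · subst hJ0
          have hpre : pre = [] := by
            rw [← List.length_eq_zero_iff, hpreJ]
          subst hpre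
          have hMr0 : M = r0 ∧ s2 = rest := by
            have := hremdec
            simp at this
            exact ⟨this.1.symm, this.2.symm⟩
          obtain ⟨hM0, hs20⟩ := hMr0
          rw [if_neg (by simp)]
          have := ih rest (out ++ [r0]) moves (by omega)
          rw [show (out ++ [r0]) ++ rest = out ++ r0 :: rest by simp] at this
          rw [show ((out ++ [r0]).length : Int) = (out.length : Int) + 1 by simp] at this
          rw [this, hM0, hs20]
          norm_num
        · rw [if_pos (by simp; omega)]
          have hsw : aSwaps (out ++ r0 :: rest)
                (PySem.List.pyRange ((out.length : Int) + (J : Int)) ((out.length : Int)) (-1))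
              = out ++ M :: (pre ++ s2) := by
            rw [hremdec, show out ++ (pre ++ M :: s2) = out ++ pre ++ M :: s2 by simp,
                show ((J : Nat) : Int) = ((pre.length : Nat) : Int) by rw [hpreJ]]
            exact swaps_rotate pre out s2 M
          rw [hsw]
          have hmv : moves - ((out.length : Int) + (J : Int) - (out.length : Int)) = moves - (J : Int) := by
            ring
          rw [hmv]
          have := ih (pre ++ s2) (out ++ [M]) (moves - (J : Int)) (by simp [List.length_append]; omega)
          rw [show (out ++ [M]) ++ (pre ++ s2) = out ++ M :: (pre ++ s2) by simp] at this
          rw [show ((out ++ [M]).length : Int) = (out.length : Int) + 1 by simp] at this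
          rw [this]
      · have hAneg : ¬ (moves > 0 ∧ (out.length : Int) < ((out ++ rem).length : Int) - 1) := by
          intro ⟨h1, h2⟩
          apply hg
          refine ⟨h1, ?_⟩
          push_cast [List.length_append] at h2
          omega
        rw [aLoop, if_neg hAneg, bLoop, if_neg hg]

-- ===== VERDICT (by name: the statement is the Claim_ definition above) =====
theorem findMinArray_spec : Claim_equal_findMinArray := by
  intro arr k _
  unfold Spec_findMinArray findMinArray findMinArray_alt
  have := main_loop arr.length arr [] k le_rfl
  simpa using this
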